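-- pv_equiv track=rewrite | github.com/DK8DE/FT991AudioManager | mapping/meter_mapping.py | _raw_watt_table_from_watt_raw
-- ===== SOURCE A (Python) =====
-- from typing import Callable, Dict, List, Optional, Tuple
--
-- def _raw_watt_table_from_watt_raw(
--     watt_raw: List[Tuple[int, int]],
-- ) -> List[Tuple[int, int]]:
--     raw_to_w: Dict[int, int] = {}
--     for watts, raw in watt_raw:
--         w, r = int(watts), int(raw)
--         if w > 0:
--             raw_to_w[r] = max(raw_to_w.get(r, 0), w)
--     if not raw_to_w:
--         return [(0, 0)]
--     return [(0, 0)] + sorted(raw_to_w.items())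
-- ===== SOURCE B (Python) =====
-- from typing import List, Tuple
--
-- def _raw_watt_table_from_watt_raw(
--     watt_raw: List[Tuple[int, int]],
-- ) -> List[Tuple[int, int]]:
--     pairs = sorted((int(raw), int(watts)) for watts, raw in watt_raw if int(watts) > 0)
--     grouped: List[Tuple[int, int]] = []
--     for r, w in pairs:
--         if grouped and grouped[-1][0] == r:
--             grouped[-1] = (r, w)  # sorted by (raw, watts): the last of a run is the max
--         else:
--             grouped.append((r, w))
--     if not grouped:
--         return [(0, 0)]
--     return [(0, 0)] + grouped
-- ===== Notes on version B (the rewrite author's own statement) =====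
-- stated objective: simpler
-- what changed: Replaces the max-aggregating dict with a filter-swap-sort by (raw, watts) followed by one linear pass that keeps the last entry of each equal-raw run.
import Mathlib
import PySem

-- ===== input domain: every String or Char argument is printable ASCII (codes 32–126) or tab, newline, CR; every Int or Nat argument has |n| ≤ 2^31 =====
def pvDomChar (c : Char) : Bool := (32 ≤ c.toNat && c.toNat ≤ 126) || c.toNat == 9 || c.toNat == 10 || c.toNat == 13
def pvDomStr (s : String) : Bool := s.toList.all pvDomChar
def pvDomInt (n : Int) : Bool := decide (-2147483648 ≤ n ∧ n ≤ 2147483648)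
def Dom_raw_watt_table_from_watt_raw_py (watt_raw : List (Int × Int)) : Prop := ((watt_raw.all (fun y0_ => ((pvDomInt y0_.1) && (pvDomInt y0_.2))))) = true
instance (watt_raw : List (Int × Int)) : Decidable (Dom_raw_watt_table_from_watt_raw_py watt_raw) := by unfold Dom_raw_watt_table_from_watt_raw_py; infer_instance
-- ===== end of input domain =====

-- B replaces A's max-aggregating dict with filter + swap + sort by (raw, watts) + one
-- linear pass keeping the last entry of each equal-raw run (objective: simpler/alternative).

-- ===== PORT A =====
-- dict loop: raw_to_w[r] = max(raw_to_w.get(r, 0), w) for w > 0; then [(0,0)] ++ sorted(items)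
def raw_watt_table_from_watt_raw_py (watt_raw : List (Int × Int)) : List (Int × Int) :=
  let raw_to_w : PySem.Dict Int Int :=
    watt_raw.foldl (fun d p =>
      if p.1 > 0 then d.insert p.2 (max (d.getD p.2 0) p.1) else d) PySem.Dict.empty
  if raw_to_w.items = [] then [(0, 0)]
  else [(0, 0)] ++ PySem.List.sorted2 raw_to_w.items (fun q => q.1) (fun q => q.2)

-- ===== PORT B =====
-- one step of B's pass: overwrite the last kept entry when its raw equals p's, else append
def pvGroupStep (acc : List (Int × Int)) (p : Int × Int) : List (Int × Int) :=
  match acc.getLast? with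
  | some q => if q.1 = p.1 then acc.dropLast ++ [p] else acc ++ [p]
  | none   => acc ++ [p]

def raw_watt_table_from_watt_raw_py_alt (watt_raw : List (Int × Int)) : List (Int × Int) :=
  let pairs := PySem.List.sorted2
    ((watt_raw.filter (fun p => p.1 > 0)).map (fun p => (p.2, p.1)))
    (fun q => q.1) (fun q => q.2)
  let grouped := pairs.foldl pvGroupStep []
  if grouped = [] then [(0, 0)] else (0, 0) :: grouped

-- ===== PRECONDITION & SPEC =====
def Spec_raw_watt_table_from_watt_raw_py (watt_raw : List (Int × Int)) (out : List (Int × Int)) : Prop := out = raw_watt_table_from_watt_raw_py_alt watt_raw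
instance (watt_raw : List (Int × Int)) (out : List (Int × Int)) : Decidable (Spec_raw_watt_table_from_watt_raw_py watt_raw out) := by unfold Spec_raw_watt_table_from_watt_raw_py; infer_instance

-- ===== CLAIM (what is proved, stated in full; the proofs are below) =====
def Claim_equal_raw_watt_table_from_watt_raw_py : Prop := ∀ (watt_raw : List (Int × Int)), Dom_raw_watt_table_from_watt_raw_py watt_raw → Spec_raw_watt_table_from_watt_raw_py watt_raw (raw_watt_table_from_watt_raw_py watt_raw)

-- ===== LEMMAS AND PROOFS =====

-- the (non-strict) lexicographic order Python's tuple sort uses on (raw, watt) pairs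
def pvLexLe (a b : Int × Int) : Prop := a.1 < b.1 ∨ (a.1 = b.1 ∧ a.2 ≤ b.2)

-- the Bool comparison sorted2 inserts by
def pvBlex (a b : Int × Int) : Bool :=
  decide (a.1 < b.1) || (!decide (b.1 < a.1) && decide (a.2 < b.2))

lemma pvBlex_true {a b : Int × Int} (h : pvBlex a b = true) : pvLexLe a b := by
  simp [pvBlex] at h; unfold pvLexLe; omega

lemma pvBlex_false {a b : Int × Int} (h : pvBlex a b = false) : pvLexLe b a := by
  simp [pvBlex] at h; unfold pvLexLe; omega

lemma pvLexLe_trans {a b c : Int × Int} (h1 : pvLexLe a b) (h2 : pvLexLe b c) : pvLexLe a c := by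
  unfold pvLexLe at *; omega

lemma pvLexLe_antisymm {a b : Int × Int} (h1 : pvLexLe a b) (h2 : pvLexLe b a) : a = b := by
  unfold pvLexLe at *
  have h3 : a.1 = b.1 ∧ a.2 = b.2 := by omega
  exact Prod.ext h3.1 h3.2

lemma pvInsertBy_pairwise (x : Int × Int) (ys : List (Int × Int))
    (h : ys.Pairwise pvLexLe) :
    (PySem.List.insertBy pvBlex x ys).Pairwise pvLexLe := by
  induction ys with
  | nil => simp [PySem.List.insertBy]
  | cons y t ih =>
    rw [List.pairwise_cons] at h
    simp only [PySem.List.insertBy]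
    by_cases hb : pvBlex x y = true
    · simp only [hb, if_true]
      refine List.Pairwise.cons ?_ (List.Pairwise.cons h.1 h.2)
      intro z hz
      rcases List.mem_cons.mp hz with rfl | hz
      · exact pvBlex_true hb
      · exact pvLexLe_trans (pvBlex_true hb) (h.1 z hz)
    · simp only [hb]
      refine List.Pairwise.cons ?_ (ih h.2)
      intro z hz
      rw [PySem.List.insertBy_mem_iff] at hz
      rcases hz with rfl | hz
      · exact pvBlex_false (by simpa using hb)
      · exact h.1 z hz

lemma pvFoldl_insertBy_pairwise (xs : List (Int × Int)) (acc : List (Int × Int))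
    (h : acc.Pairwise pvLexLe) :
    (xs.foldl (fun acc x => PySem.List.insertBy pvBlex x acc) acc).Pairwise pvLexLe := by
  induction xs generalizing acc with
  | nil => simpa using h
  | cons x t ih => exact ih _ (pvInsertBy_pairwise x acc h)

lemma pvSorted2_eq_foldl (xs : List (Int × Int)) :
    PySem.List.sorted2 xs (fun q => q.1) (fun q => q.2) false
      = xs.foldl (fun acc x => PySem.List.insertBy pvBlex x acc) [] := rfl

lemma pvSorted2_pairwise (xs : List (Int × Int)) :
    (PySem.List.sorted2 xs (fun q => q.1) (fun q => q.2) false).Pairwise pvLexLe := by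
  rw [pvSorted2_eq_foldl]
  exact pvFoldl_insertBy_pairwise xs [] (by simp)

-- any pvLexLe-ordered rearrangement of xs IS sorted(xs) under Python's tuple key
lemma pvSorted2_unique (xs ys : List (Int × Int)) (hp : ys.Perm xs)
    (hs : ys.Pairwise pvLexLe) :
    PySem.List.sorted2 xs (fun q => q.1) (fun q => q.2) false = ys := by
  refine List.Perm.eq_of_pairwise ?_ (pvSorted2_pairwise xs) hs
    ((PySem.List.sorted2_perm xs _ _ false).trans hp.symm)
  intro a b _ _ h1 h2
  exact pvLexLe_antisymm h1 h2

-- running max the dict loop keeps at key r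
def pvV (fl : List (Int × Int)) (r : Int) : Int :=
  ((fl.filter (fun p => p.2 == r)).map (fun p => p.1)).foldl max 0

lemma pvGetD_foldl (l : List (Int × Int)) (d : PySem.Dict Int Int) (r : Int) :
    (l.foldl (fun d p => d.insert p.2 (max (d.getD p.2 0) p.1)) d).getD r 0
      = ((l.filter (fun p => p.2 == r)).map (fun p => p.1)).foldl max (d.getD r 0) := by
  induction l generalizing d with
  | nil => simp
  | cons p t ih =>
    simp only [List.foldl_cons, List.filter_cons]
    by_cases hr : p.2 = r
    · subst hr
      simp only [BEq.rfl, if_true, List.map_cons, List.foldl_cons]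
      rw [ih, PySem.Dict.getD_insert_self]
    · have : (p.2 == r) = false := by simpa using hr
      simp only [this, Bool.false_eq_true, if_false]
      rw [ih, PySem.Dict.getD_insert_of_ne _ _ _ (fun h => hr h.symm)]

-- the grouped pass: strictly raw-increasing; its raws are the distinct raws in order;
-- each kept pair occurs in s and dominates all entries of s sharing its raw
lemma pvGroup_inv (s : List (Int × Int)) (hs : s.Pairwise pvLexLe) :
    ((s.foldl pvGroupStep []).Pairwise (fun a b => a.1 < b.1))
  ∧ ((s.foldl pvGroupStep []).map Prod.fst = PySem.Set.ofList (s.map Prod.fst))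
  ∧ (∀ p ∈ s.foldl pvGroupStep [], p ∈ s ∧ ∀ q ∈ s, q.1 = p.1 → q.2 ≤ p.2) := by
  induction s using List.reverseRecOn with
  | nil => simp
  | append_singleton s p ih =>
    rw [List.pairwise_append] at hs
    obtain ⟨hs1, -, hs3⟩ := hs
    obtain ⟨ih1, ih2, ih3⟩ := ih hs1
    rw [List.foldl_append, List.foldl_cons, List.foldl_nil]
    rcases List.eq_nil_or_concat (s.foldl pvGroupStep []) with hg | ⟨l', q, hg⟩
    · -- g = [] forces s = []
      rw [hg] at ih2
      have hsnil : s = [] := by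
        cases hsn : s.map Prod.fst with
        | nil => simpa using hsn
        | cons a t => rw [hsn, PySem.Set.ofList_cons] at ih2; simp at ih2
      subst hsnil
      have hstep : pvGroupStep (List.foldl pvGroupStep [] []) p = [p] := rfl
      rw [hstep]
      refine ⟨by simp, ?_, ?_⟩
      · simp only [List.nil_append, List.map_cons, List.map_nil]
        exact (PySem.Set.ofList_eq_self_of_nodup _ (by simp)).symm
      · intro x hx
        rcases List.mem_singleton.mp hx with rfl
        refine ⟨by simp, ?_⟩
        intro q hq hq1
        rcases List.mem_singleton.mp (by simpa using hq) with rfl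
        exact le_refl _
    · rw [List.concat_eq_append] at hg
      rw [hg]
      have hql : ∀ x ∈ l', x.1 < q.1 := by
        have := ih1; rw [hg, List.pairwise_append] at this
        intro x hx; exact this.2.2 x hx q (by simp)
      have hqg : q ∈ s.foldl pvGroupStep [] := by rw [hg]; simp
      have hqs : q ∈ s := (ih3 q hqg).1
      have hqmax : ∀ q' ∈ s, q'.1 = q.1 → q'.2 ≤ q.2 := (ih3 q hqg).2
      have hqp : pvLexLe q p := hs3 q hqs p (by simp)
      simp only [pvGroupStep, List.getLast?_concat, List.dropLast_concat]
      by_cases heq : q.1 = p.1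
      · simp only [heq, if_true]
        have hqp2 : q.2 ≤ p.2 := by unfold pvLexLe at hqp; omega
        refine ⟨?_, ?_, ?_⟩
        · rw [List.pairwise_append]
          have hl'p : l'.Pairwise (fun a b => a.1 < b.1) := by
            have := ih1; rw [hg, List.pairwise_append] at this; exact this.1
          exact ⟨hl'p, by simp, fun x hx b hb => by
            rcases List.mem_singleton.mp hb with rfl
            rw [← heq]; exact hql x hx⟩
        · simp only [List.map_append, List.map_cons, List.map_nil]
          rw [PySem.Set.ofList_append_singleton, ← ih2, hg]
          have hmem : p.1 ∈ (l' ++ [q]).map Prod.fst := by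
            simp [← heq]
          simp only [PySem.Set.add]
          rw [if_pos (by simpa [PySem.Set.contains] using hmem)]
          simp [heq]
        · intro x hx
          rw [List.mem_append] at hx
          rcases hx with hx | hx
          · have hxg : x ∈ s.foldl pvGroupStep [] := by rw [hg]; exact List.mem_append_left _ hx
            refine ⟨List.mem_append_left _ (ih3 x hxg).1, ?_⟩
            intro q' hq' hq'1
            rcases List.mem_append.mp hq' with hq' | hq'
            · exact (ih3 x hxg).2 q' hq' hq'1
            · rcases List.mem_singleton.mp hq' with rfl
              exact absurd (heq ▸ hq'1) (by have := hql x hx; omega)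
          · rcases List.mem_singleton.mp hx with rfl
            refine ⟨by simp, ?_⟩
            intro q' hq' hq'1
            rcases List.mem_append.mp hq' with hq' | hq'
            · exact le_trans (hqmax q' hq' (by omega)) hqp2
            · rcases List.mem_singleton.mp hq' with rfl; exact le_refl _
      · have hqlt : q.1 < p.1 := by unfold pvLexLe at hqp; omega
        simp only [heq, if_false]
        have hle : ∀ x ∈ l' ++ [q], x.1 < p.1 := by
          intro x hx
          rcases List.mem_append.mp hx with hx | hx
          · have := hql x hx; omega
          · rcases List.mem_singleton.mp hx with rfl; exact hqlt
        have hnotmem : p.1 ∉ (l' ++ [q]).map Prod.fst := by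
          intro hmem
          rcases List.mem_map.mp hmem with ⟨x, hx, hx1⟩
          have := hle x hx; omega
        refine ⟨?_, ?_, ?_⟩
        · rw [List.pairwise_append]
          refine ⟨hg ▸ ih1, by simp, fun x hx b hb => ?_⟩
          rcases List.mem_singleton.mp hb with rfl
          exact hle x hx
        · simp only [List.map_append, List.map_cons, List.map_nil]
          rw [PySem.Set.ofList_append_singleton, ← ih2, hg]
          simp only [PySem.Set.add]
          rw [if_neg (by simpa [PySem.Set.contains] using hnotmem)]
          simp
        · intro x hx
          rcases List.mem_append.mp hx with hx | hx
          · have hxg : x ∈ s.foldl pvGroupStep [] := by rw [hg]; exact hx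
            refine ⟨List.mem_append_left _ (ih3 x hxg).1, ?_⟩
            intro q' hq' hq'1
            rcases List.mem_append.mp hq' with hq' | hq'
            · exact (ih3 x hxg).2 q' hq' hq'1
            · have he : q' = p := List.mem_singleton.mp hq'
              rw [he] at hq'1
              exact absurd hq'1 (by have := hle x hx; omega)
          · have hxe : x = p := List.mem_singleton.mp hx
            refine ⟨List.mem_append_right _ (by rw [hxe]; simp), ?_⟩
            intro q' hq' hq'1
            rcases List.mem_append.mp hq' with hq' | hq'
            · exfalso
              have hin : x.1 ∈ PySem.Set.ofList (s.map Prod.fst) :=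
                (PySem.Set.mem_ofList _ _).mpr (List.mem_map.mpr ⟨q', hq', hq'1⟩)
              rw [← ih2, hg] at hin
              rw [hxe] at hin
              exact hnotmem hin
            · have he : q' = p := List.mem_singleton.mp hq'
              rw [he, ← hxe]

-- proof-only abbreviations for the two intermediate data structures
def pvDict (fl : List (Int × Int)) : PySem.Dict Int Int :=
  fl.foldl (fun d p => d.insert p.2 (max (d.getD p.2 0) p.1)) PySem.Dict.empty

def pvS (fl : List (Int × Int)) : List (Int × Int) :=
  PySem.List.sorted2 (fl.map (fun p => (p.2, p.1))) (fun q => q.1) (fun q => q.2) false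

lemma pvKeys (fl : List (Int × Int)) :
    (pvDict fl).keys = PySem.Set.ofList (fl.map (fun p => p.2)) := by
  unfold pvDict
  rw [PySem.Dict.keys_foldl_insert_key fl (fun p : Int × Int => p.2)
      (fun d p => max (d.getD p.2 0) p.1) PySem.Dict.empty]
  rw [PySem.Dict.keys_empty]
  rfl

lemma pvNodup (fl : List (Int × Int)) : (pvDict fl).keys.Nodup := by
  unfold pvDict
  exact PySem.Dict.nodup_keys_foldl_insert_key fl (fun p : Int × Int => p.2)
    (fun d p => max (d.getD p.2 0) p.1) PySem.Dict.empty (by rw [PySem.Dict.keys_empty]; exact List.nodup_nil)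

lemma pvVal (fl : List (Int × Int)) (r : Int) : (pvDict fl).getD r 0 = pvV fl r := by
  unfold pvDict pvV
  rw [pvGetD_foldl]
  rw [PySem.Dict.getD_empty]

lemma pvItems (fl : List (Int × Int)) :
    (pvDict fl).items = (pvDict fl).keys.map (fun k => (k, pvV fl k)) := by
  rw [PySem.Dict.items_eq_map_keys _ (pvNodup fl) 0]
  exact List.map_congr_left (fun k _ => by rw [pvVal])

-- the core equality, on the already-filtered list
lemma pvAux (fl : List (Int × Int)) (hpos : ∀ p ∈ fl, (0:Int) < p.1) :
    (if (pvDict fl).items = [] then [((0:Int), (0:Int))]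
     else [((0:Int), (0:Int))] ++ PySem.List.sorted2 (pvDict fl).items (fun q => q.1) (fun q => q.2))
    = (if (pvS fl).foldl pvGroupStep [] = [] then [((0:Int), (0:Int))]
       else ((0:Int), (0:Int)) :: (pvS fl).foldl pvGroupStep []) := by
  have hsperm : (pvS fl).Perm (fl.map (fun p => (p.2, p.1))) :=
    PySem.List.sorted2_perm _ _ _ _
  have hslex : (pvS fl).Pairwise pvLexLe := pvSorted2_pairwise _
  obtain ⟨hg1, hg2, hg3⟩ := pvGroup_inv (pvS fl) hslex
  have hmem_s : ∀ p : Int × Int, p ∈ pvS fl ↔ (p.2, p.1) ∈ fl := by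
    intro p
    rw [hsperm.mem_iff, List.mem_map]
    constructor
    · rintro ⟨x, hx, rfl⟩; simpa using hx
    · intro h; exact ⟨(p.2, p.1), h, rfl⟩
  have hgv : ∀ p ∈ (pvS fl).foldl pvGroupStep [], p.2 = pvV fl p.1 := by
    intro p hpg
    obtain ⟨hps, hpmax⟩ := hg3 p hpg
    have hpf : (p.2, p.1) ∈ fl := (hmem_s p).mp hps
    have hpin : p.2 ∈ (fl.filter (fun x => x.2 == p.1)).map (fun x => x.1) :=
      List.mem_map.mpr ⟨(p.2, p.1), List.mem_filter.mpr ⟨hpf, by simp⟩, rfl⟩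
    have hub : ∀ v ∈ (fl.filter (fun x => x.2 == p.1)).map (fun x => x.1), v ≤ p.2 := by
      intro v hv
      obtain ⟨x, hx, rfl⟩ := List.mem_map.mp hv
      have hxf : x ∈ fl := (List.mem_filter.mp hx).1
      have hx2 : x.2 = p.1 := by simpa using (List.mem_filter.mp hx).2
      have hxs : (x.2, x.1) ∈ pvS fl := (hmem_s (x.2, x.1)).mpr (by simpa using hxf)
      exact hpmax (x.2, x.1) hxs hx2
    have h1 := (PySem.List.le_foldl_max ((fl.filter (fun x => x.2 == p.1)).map (fun x => x.1)) 0).2 p.2 hpin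
    unfold pvV
    rcases PySem.List.foldl_max_mem ((fl.filter (fun x => x.2 == p.1)).map (fun x => x.1)) 0 with h0 | hm
    · exfalso
      rw [h0] at h1
      obtain ⟨x, hx, hxe⟩ := List.mem_map.mp hpin
      have := hpos x (List.mem_filter.mp hx).1
      omega
    · have h2 := hub _ hm
      omega
  have hfsts : ((pvS fl).map Prod.fst).Perm (fl.map (fun p => p.2)) := by
    have h := hsperm.map Prod.fst
    simpa [List.map_map, Function.comp] using h
  have hfperm : (((pvS fl).foldl pvGroupStep []).map Prod.fst).Perm (pvDict fl).keys := by
    rw [hg2, pvKeys]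
    rw [List.perm_ext_iff_of_nodup (PySem.Set.nodup_ofList _) (PySem.Set.nodup_ofList _)]
    intro a
    rw [PySem.Set.mem_ofList, PySem.Set.mem_ofList]
    exact hfsts.mem_iff
  have hgid : ((pvS fl).foldl pvGroupStep [])
      = (((pvS fl).foldl pvGroupStep []).map Prod.fst).map (fun r => (r, pvV fl r)) := by
    rw [List.map_map]
    conv_lhs => rw [← List.map_id ((pvS fl).foldl pvGroupStep [])]
    exact List.map_congr_left (fun p hp => Prod.ext rfl (hgv p hp))
  have hgperm : ((pvS fl).foldl pvGroupStep []).Perm (pvDict fl).items := by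
    rw [pvItems]
    conv_lhs => rw [hgid]
    exact hfperm.map _
  have hglex : ((pvS fl).foldl pvGroupStep []).Pairwise pvLexLe :=
    hg1.imp (fun h => Or.inl h)
  have hsorted : PySem.List.sorted2 (pvDict fl).items (fun q => q.1) (fun q => q.2) false
      = (pvS fl).foldl pvGroupStep [] := pvSorted2_unique _ _ hgperm hglex
  by_cases hfe : fl = []
  · subst hfe; rfl
  · obtain ⟨a, t, rfl⟩ := List.exists_cons_of_ne_nil hfe
    have hitems_ne : (pvDict (a :: t)).items ≠ [] := by
      rw [pvItems, pvKeys]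
      simp [PySem.Set.ofList_cons]
    have hg_ne : (pvS (a :: t)).foldl pvGroupStep [] ≠ [] := by
      intro h
      have := hgperm
      rw [h] at this
      have hlen := this.length_eq
      have hlen2 : (pvDict (a :: t)).items.length ≠ 0 := by
        intro h0
        exact hitems_ne (List.eq_nil_of_length_eq_zero h0)
      simp at hlen
      exact hlen2 hlen.symm
    rw [if_neg hitems_ne, if_neg hg_ne, hsorted]
    rfl

-- the main equality
lemma pvMain (watt_raw : List (Int × Int)) :
    raw_watt_table_from_watt_raw_py watt_raw = raw_watt_table_from_watt_raw_py_alt watt_raw := by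
  have hA : raw_watt_table_from_watt_raw_py watt_raw
      = (if (pvDict (watt_raw.filter (fun p => p.1 > 0))).items = [] then [((0:Int), (0:Int))]
         else [((0:Int), (0:Int))] ++ PySem.List.sorted2 (pvDict (watt_raw.filter (fun p => p.1 > 0))).items (fun q => q.1) (fun q => q.2)) := by
    simp only [raw_watt_table_from_watt_raw_py, pvDict]
    rw [PySem.List.foldl_ite_eq_foldl_filter (p := fun x : Int × Int => x.1 > 0)
        (f := fun (d : PySem.Dict Int Int) (p : Int × Int) => d.insert p.2 (max (d.getD p.2 0) p.1))
        (l := watt_raw) (init := PySem.Dict.empty)]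
  have hB : raw_watt_table_from_watt_raw_py_alt watt_raw
      = (if (pvS (watt_raw.filter (fun p => p.1 > 0))).foldl pvGroupStep [] = [] then [((0:Int), (0:Int))]
         else ((0:Int), (0:Int)) :: (pvS (watt_raw.filter (fun p => p.1 > 0))).foldl pvGroupStep []) := rfl
  rw [hA, hB]
  exact pvAux _ (fun p hp => by
    have := List.mem_filter.mp hp
    simpa using this.2)

-- ===== VERDICT (by name: the statement is the Claim_ definition above) =====
theorem raw_watt_table_from_watt_raw_py_spec : Claim_equal_raw_watt_table_from_watt_raw_py := by
  intro watt_raw _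
  exact pvMain watt_raw
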